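-- pv_equiv track=rewrite | github.com/alphagov/notifications-admin | app/utils.py | email_address_ends_with
-- ===== SOURCE A (Python) =====
-- def email_address_ends_with(email_address, known_domains):
--     return any(
--         email_address.lower().endswith((
--             "@{}".format(known),
--             ".{}".format(known),
--         ))
--         for known in known_domains
--     )
-- ===== SOURCE B (Python) =====
-- def email_address_ends_with(email_address, known_domains):
--     domains = set(known_domains)
--     email = email_address.lower()
--     for i, ch in enumerate(email):
--         if ch in "@." and email[i + 1:] in domains:
--             return True
--     return False
-- ===== Notes on version B (the rewrite author's own statement) =====
-- stated objective: faster
-- what changed: Instead of looping over known_domains and suffix-matching each against the lowercased email, B lowercases the email once, puts the domains in a set, and scans the email once, testing the suffix after each '@'/'.' delimiter for set membership.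
import Mathlib
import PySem

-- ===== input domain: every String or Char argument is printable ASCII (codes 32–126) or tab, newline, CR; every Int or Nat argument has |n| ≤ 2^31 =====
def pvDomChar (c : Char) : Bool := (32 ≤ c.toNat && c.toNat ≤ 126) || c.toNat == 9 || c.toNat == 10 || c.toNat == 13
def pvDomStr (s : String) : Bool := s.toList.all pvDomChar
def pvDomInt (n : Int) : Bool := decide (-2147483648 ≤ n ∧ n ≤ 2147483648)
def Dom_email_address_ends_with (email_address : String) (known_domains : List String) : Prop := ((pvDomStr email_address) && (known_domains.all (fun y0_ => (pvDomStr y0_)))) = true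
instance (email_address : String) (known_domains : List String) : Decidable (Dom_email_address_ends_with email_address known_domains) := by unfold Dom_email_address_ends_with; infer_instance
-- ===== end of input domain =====

-- B scans the lowercased email once at '@'/'.' boundaries against a set of the known domains
-- (alternative traversal: over the email's delimiters instead of over the domain list).


-- ===== PORT A =====
-- any(email_address.lower().endswith(("@"+known, "."+known)) for known in known_domains)
-- ("@{}".format(known) is the char list '@' :: known.toList; strings handled on the List Char side)
def email_address_ends_with (email_address : String) (known_domains : List String) : Bool :=
  known_domains.any (fun known =>
    PySem.Chars.endswith (PySem.Chars.lower email_address.toList) ('@' :: known.toList) ||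
    PySem.Chars.endswith (PySem.Chars.lower email_address.toList) ('.' :: known.toList))

-- ===== PORT B =====
-- domains = set(known_domains); email = email_address.lower();
-- for i, ch in enumerate(email): if ch in "@." and email[i+1:] in domains: return True;  return False
def email_address_ends_with_alt (email_address : String) (known_domains : List String) : Bool :=
  let domains : PySem.Set (List Char) := PySem.Set.ofList (known_domains.map String.toList)
  let email := PySem.Chars.lower email_address.toList
  (PySem.List.enumerate email 0).any (fun p =>
    (p.2 == '@' || p.2 == '.') &&
    PySem.Set.contains domains (PySem.List.slice email (some (p.1 + 1)) none))

-- ===== PRECONDITION & SPEC =====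
def Spec_email_address_ends_with (email_address : String) (known_domains : List String) (out : Bool) : Prop := out = email_address_ends_with_alt email_address known_domains
instance (email_address : String) (known_domains : List String) (out : Bool) : Decidable (Spec_email_address_ends_with email_address known_domains out) := by unfold Spec_email_address_ends_with; infer_instance

-- ===== CLAIM (what is proved, stated in full; the proofs are below) =====
def Claim_equal_email_address_ends_with : Prop := ∀ (email_address : String) (known_domains : List String), Dom_email_address_ends_with email_address known_domains → Spec_email_address_ends_with email_address known_domains (email_address_ends_with email_address known_domains)

-- ===== LEMMAS AND PROOFS =====

-- a nonempty suffix c :: t of low is exactly an occurrence of c at some index k with t the rest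
lemma suffix_cons_iff (low t : List Char) (c : Char) :
    (c :: t) <:+ low ↔ ∃ (k : Nat) (h : k < low.length), low[k] = c ∧ low.drop (k + 1) = t := by
  constructor
  · rintro ⟨p, rfl⟩
    refine ⟨p.length, by simp, ?_, ?_⟩
    · simp
    · simp
  · rintro ⟨k, h, hc, hd⟩
    exact ⟨low.take k, by rw [← hd, ← hc, List.getElem_cons_drop, List.take_append_drop]⟩

-- the core inversion: "some domain, prefixed by '@' or '.', is a suffix of low"
-- ⟺ "some delimiter position of low has its tail among the domains"
lemma scan_iff (low : List Char) (ts : List (List Char)) :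
    (∃ t ∈ ts, ('@' :: t) <:+ low ∨ ('.' :: t) <:+ low) ↔
    (∃ (k : Nat) (h : k < low.length), (low[k] = '@' ∨ low[k] = '.') ∧ low.drop (k + 1) ∈ ts) := by
  constructor
  · rintro ⟨t, ht, h | h⟩ <;>
      · obtain ⟨k, hk, hc, hd⟩ := (suffix_cons_iff low t _).1 h
        exact ⟨k, hk, by simp [hc], hd ▸ ht⟩
  · rintro ⟨k, hk, hc | hc, hd⟩
    · exact ⟨low.drop (k + 1), hd, Or.inl ((suffix_cons_iff _ _ _).2 ⟨k, hk, hc, rfl⟩)⟩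
    · exact ⟨low.drop (k + 1), hd, Or.inr ((suffix_cons_iff _ _ _).2 ⟨k, hk, hc, rfl⟩)⟩

-- ===== VERDICT (by name: the statement is the Claim_ definition above) =====
theorem email_address_ends_with_spec : Claim_equal_email_address_ends_with := by
  intro e ks _
  unfold Spec_email_address_ends_with email_address_ends_with email_address_ends_with_alt
  rw [Bool.eq_iff_iff]
  simp only [List.any_eq_true, Bool.or_eq_true, Bool.and_eq_true, beq_iff_eq,
    PySem.Chars.endswith_iff, PySem.List.mem_enumerate_iff, PySem.Set.contains_iff,
    PySem.Set.mem_ofList, List.mem_map]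
  set low := PySem.Chars.lower e.toList with hlow
  constructor
  · intro h
    have h' : ∃ t ∈ ks.map String.toList, ('@' :: t) <:+ low ∨ ('.' :: t) <:+ low := by
      obtain ⟨k, hk, h⟩ := h
      exact ⟨k.toList, List.mem_map_of_mem hk, h⟩
    obtain ⟨k, hk, hc, hd⟩ := (scan_iff low _).1 h'
    refine ⟨(0 + (k : Int), low[k]), ⟨k, hk, rfl⟩, by simpa using hc, ?_⟩
    have : (0 : Int) + (k : Int) + 1 = ((k + 1 : Nat) : Int) := by push_cast; ring
    rw [this, PySem.List.slice_from_natCast]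
    simpa using hd
  · rintro ⟨p, ⟨k, hk, rfl⟩, hc, hmem⟩
    have hsl : PySem.List.slice low (some ((0 : Int) + (k : Int) + 1)) none = low.drop (k + 1) := by
      have : (0 : Int) + (k : Int) + 1 = ((k + 1 : Nat) : Int) := by push_cast; ring
      rw [this, PySem.List.slice_from_natCast]
    rw [hsl] at hmem
    have h' := (scan_iff low (ks.map String.toList)).2
      ⟨k, hk, by simpa using hc, by obtain ⟨s, hs, hst⟩ := hmem; exact List.mem_map.2 ⟨s, hs, hst⟩⟩
    obtain ⟨t, ht, hor⟩ := h'
    obtain ⟨s', hs', rfl⟩ := List.mem_map.1 ht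
    exact ⟨s', hs', hor⟩
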